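-- pv_equiv track=rewrite | github.com/SENG-499-Company2-B01/Algs2 | enrollment_predictions/models/perceptron.py | findPrevTermCourses
-- ===== SOURCE A (Python) =====
-- def findPrevTermCourses(course_name):
--     terms = {
--         1: {
--             'term': 'fall',
--             'courses': [
--                 "CSC111"
--             ]
--         },
--         2: {
--             'term': 'spring',
--             'courses': [
--                 "CSC115"
--             ]
--         },
--         3: {
--             'term': 'fall',
--             'courses': [
--                 "CSC230",
--                 "ECE255",
--                 "ECE260",
--                 "SENG265"
--             ]
--         },
--         4: {
--             'term': 'summer',
--             'courses': [
--                 "CSC225",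
--                 "ECE310",
--                 "SENG275",
--                 "SENG310"
--             ]
--         },
--         5: {
--             'term': 'spring',
--             'courses': [
--                 "ECE363",
--                 "CSC361",
--                 "CSC226",
--                 "ECE360",
--                 "SENG321",
--                 "SENG371"
--             ]
--         },
--         6: {
--             'term': 'fall',
--             'courses': [
--                 "ECE355",
--                 "CSC355",
--                 "CSC320",
--                 "CSC360",
--                 "CSC370",
--                 "SENG350",
--                 "SENG360"
--             ]
--         },
--         7: {
--             'term': 'summer',
--             'courses': [
--                 "SENG426",
--                 "SENG440",
--                 "SENG499"
--             ]
--         },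
--         8: {
--             'term': 'spring',
--             'courses': [
--                 "ECE455",
--                 "CSC460",
--                 "SENG401"
--             ]
--         }
--     }
--     for term_num, term in terms.items():
--         if course_name in term['courses'] and term_num != 1:
--             return terms[term_num - 1]['courses'].copy()
--     return []
-- ===== SOURCE B (Python) =====
-- _TERMS = {
--     1: {'term': 'fall',   'courses': ["CSC111"]},
--     2: {'term': 'spring', 'courses': ["CSC115"]},
--     3: {'term': 'fall',   'courses': ["CSC230", "ECE255", "ECE260", "SENG265"]},
--     4: {'term': 'summer', 'courses': ["CSC225", "ECE310", "SENG275", "SENG310"]},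
--     5: {'term': 'spring', 'courses': ["ECE363", "CSC361", "CSC226", "ECE360", "SENG321", "SENG371"]},
--     6: {'term': 'fall',   'courses': ["ECE355", "CSC355", "CSC320", "CSC360", "CSC370", "SENG350", "SENG360"]},
--     7: {'term': 'summer', 'courses': ["SENG426", "SENG440", "SENG499"]},
--     8: {'term': 'spring', 'courses': ["ECE455", "CSC460", "SENG401"]},
-- }
--
-- # Inverted table built once: course -> previous term's course list.
-- _PREV = {c: _TERMS[n - 1]['courses']
--          for n, t in _TERMS.items() if n > 1
--          for c in t['courses']}
--
-- def findPrevTermCourses(course_name):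
--     return _PREV.get(course_name, []).copy()
-- ===== Notes on version B (the rewrite author's own statement) =====
-- stated objective: simpler
-- what changed: Replaces the per-call scan over every term's course list with a module-level inverted table (course -> previous term's courses) built once by a comprehension, so the function body is a single dict .get with a copy.
import Mathlib
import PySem

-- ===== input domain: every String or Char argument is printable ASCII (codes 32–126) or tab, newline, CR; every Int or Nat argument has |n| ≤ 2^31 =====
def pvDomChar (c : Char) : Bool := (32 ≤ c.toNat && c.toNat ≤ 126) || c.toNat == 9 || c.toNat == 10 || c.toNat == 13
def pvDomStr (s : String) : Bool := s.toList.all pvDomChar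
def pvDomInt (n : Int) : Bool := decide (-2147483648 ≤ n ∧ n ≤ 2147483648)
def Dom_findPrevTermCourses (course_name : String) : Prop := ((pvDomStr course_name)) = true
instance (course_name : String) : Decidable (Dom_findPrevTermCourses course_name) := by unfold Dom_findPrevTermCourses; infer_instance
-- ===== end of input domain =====

-- B replaces A's per-call scan of every term's course list by a once-built inverted
-- course → previous-term-courses table and a single lookup (objective: simpler/faster lookup).

-- ===== PORT A =====
-- the literal `terms` dict of A: term_num ↦ (term name, courses)
def pvTermsA : List (Int × String × List String) :=
  [ (1, "fall",   ["CSC111"]),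
    (2, "spring", ["CSC115"]),
    (3, "fall",   ["CSC230", "ECE255", "ECE260", "SENG265"]),
    (4, "summer", ["CSC225", "ECE310", "SENG275", "SENG310"]),
    (5, "spring", ["ECE363", "CSC361", "CSC226", "ECE360", "SENG321", "SENG371"]),
    (6, "fall",   ["ECE355", "CSC355", "CSC320", "CSC360", "CSC370", "SENG350", "SENG360"]),
    (7, "summer", ["SENG426", "SENG440", "SENG499"]),
    (8, "spring", ["ECE455", "CSC460", "SENG401"]) ]

-- `terms[term_num - 1]['courses']` (the key always exists when the loop takes the branch)
def pvTermCoursesA (n : Int) : List String :=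
  ((pvTermsA.lookup n).map (fun t => t.2)).getD []

-- the `for term_num, term in terms.items():` loop of A
def pvLoopA (course_name : String) : List (Int × String × List String) → List String
  | [] => []
  | (n, t) :: rest =>
      if t.2.contains course_name && n != 1 then pvTermCoursesA (n - 1)
      else pvLoopA course_name rest

def findPrevTermCourses (course_name : String) : List String :=
  pvLoopA course_name pvTermsA

-- ===== PORT B =====
-- the inverted-table comprehension of Source B:
-- {c: _TERMS[n-1]['courses'] for (n, t) in _TERMS.items() if n > 1 for c in t['courses']}
def pvPrevTable : List (String × List String) :=
  pvTermsA.flatMap (fun nt =>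
    if nt.1 > 1 then
      nt.2.2.map (fun c =>
        (c, ((pvTermsA.lookup (nt.1 - 1)).map (fun t => t.2)).getD []))
    else [])

-- `dict.get(course_name, [])`: first-match lookup in the (duplicate-free) table
def pvGetB (c : String) : List (String × List String) → Option (List String)
  | [] => none
  | (k, v) :: rest => if c == k then some v else pvGetB c rest

def findPrevTermCourses_alt (course_name : String) : List String :=
  (pvGetB course_name pvPrevTable).getD []

-- ===== PRECONDITION & SPEC =====
def Spec_findPrevTermCourses (course_name : String) (out : List String) : Prop := out = findPrevTermCourses_alt course_name
instance (course_name : String) (out : List String) : Decidable (Spec_findPrevTermCourses course_name out) := by unfold Spec_findPrevTermCourses; infer_instance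

-- ===== CLAIM (what is proved, stated in full; the proofs are below) =====
def Claim_equal_findPrevTermCourses : Prop := ∀ (course_name : String), Dom_findPrevTermCourses course_name → Spec_findPrevTermCourses course_name (findPrevTermCourses course_name)

-- ===== LEMMAS AND PROOFS =====

-- ===== VERDICT (by name: the statement is the Claim_ definition above) =====
theorem findPrevTermCourses_spec : Claim_equal_findPrevTermCourses := by
  intro s _
  unfold Spec_findPrevTermCourses
  by_cases h0 : s = "CSC115"
  · subst h0; rfl
  by_cases h1 : s = "CSC230"
  · subst h1; rfl
  by_cases h2 : s = "ECE255"
  · subst h2; rfl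
  by_cases h3 : s = "ECE260"
  · subst h3; rfl
  by_cases h4 : s = "SENG265"
  · subst h4; rfl
  by_cases h5 : s = "CSC225"
  · subst h5; rfl
  by_cases h6 : s = "ECE310"
  · subst h6; rfl
  by_cases h7 : s = "SENG275"
  · subst h7; rfl
  by_cases h8 : s = "SENG310"
  · subst h8; rfl
  by_cases h9 : s = "ECE363"
  · subst h9; rfl
  by_cases h10 : s = "CSC361"
  · subst h10; rfl
  by_cases h11 : s = "CSC226"
  · subst h11; rfl
  by_cases h12 : s = "ECE360"
  · subst h12; rfl
  by_cases h13 : s = "SENG321"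
  · subst h13; rfl
  by_cases h14 : s = "SENG371"
  · subst h14; rfl
  by_cases h15 : s = "ECE355"
  · subst h15; rfl
  by_cases h16 : s = "CSC355"
  · subst h16; rfl
  by_cases h17 : s = "CSC320"
  · subst h17; rfl
  by_cases h18 : s = "CSC360"
  · subst h18; rfl
  by_cases h19 : s = "CSC370"
  · subst h19; rfl
  by_cases h20 : s = "SENG350"
  · subst h20; rfl
  by_cases h21 : s = "SENG360"
  · subst h21; rfl
  by_cases h22 : s = "SENG426"
  · subst h22; rfl
  by_cases h23 : s = "SENG440"
  · subst h23; rfl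
  by_cases h24 : s = "SENG499"
  · subst h24; rfl
  by_cases h25 : s = "ECE455"
  · subst h25; rfl
  by_cases h26 : s = "CSC460"
  · subst h26; rfl
  by_cases h27 : s = "SENG401"
  · subst h27; rfl
  simp [findPrevTermCourses, findPrevTermCourses_alt, pvLoopA, pvTermsA, pvPrevTable, pvGetB, h0, h1, h2, h3, h4, h5, h6, h7, h8, h9, h10, h11, h12, h13, h14, h15, h16, h17, h18, h19, h20, h21, h22, h23, h24, h25, h26, h27]
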